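-- pv_equiv track=rewrite | github.com/Gilgames000/nos-damage | util/sptools.py | ele_points
-- ===== SOURCE A (Python) =====
-- def ele_points(element=0, build=None):
--     if build:
--         element = build[0]
--
--     if element == 0:
--         return 0
--     if 1 <= element <= 20:
--         return 1 + ele_points(element - 1)
--     if 21 <= element <= 30:
--         return 2 + ele_points(element - 1)
--     if 31 <= element <= 40:
--         return 3 + ele_points(element - 1)
--     if 41 <= element <= 50:
--         return 4 + ele_points(element - 1)
--     if 51 <= element <= 70:
--         return 5 + ele_points(element - 1)
--     if 71 <= element <= 80:
--         return 6 + ele_points(element - 1)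
--     if 81 <= element <= 100:
--         return 7 + ele_points(element - 1)
--     raise ValueError("SP build element points must be an integer"
--                      "between 0 and 100")
-- ===== SOURCE B (Python) =====
-- # Closed-form band sum: O(1) instead of O(n) recursion.
-- def ele_points(element=0, build=None):
--     if build:
--         element = build[0]
--     if not (0 <= element <= 100):
--         raise ValueError("SP build element points must be an integer"
--                          "between 0 and 100")
--     total = 0
--     for lo, hi, w in ((1, 20, 1), (21, 30, 2), (31, 40, 3), (41, 50, 4),
--                       (51, 70, 5), (71, 80, 6), (81, 100, 7)):
--         if element >= lo:
--             total += (min(element, hi) - lo + 1) * w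
--     return total
-- ===== Notes on version B (the rewrite author's own statement) =====
-- stated objective: faster
-- what changed: Replaces the level-by-level recursion with a closed-form sum over the seven weight bands (clamped band widths times weight), computed in a single constant-length loop.
import Mathlib
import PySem

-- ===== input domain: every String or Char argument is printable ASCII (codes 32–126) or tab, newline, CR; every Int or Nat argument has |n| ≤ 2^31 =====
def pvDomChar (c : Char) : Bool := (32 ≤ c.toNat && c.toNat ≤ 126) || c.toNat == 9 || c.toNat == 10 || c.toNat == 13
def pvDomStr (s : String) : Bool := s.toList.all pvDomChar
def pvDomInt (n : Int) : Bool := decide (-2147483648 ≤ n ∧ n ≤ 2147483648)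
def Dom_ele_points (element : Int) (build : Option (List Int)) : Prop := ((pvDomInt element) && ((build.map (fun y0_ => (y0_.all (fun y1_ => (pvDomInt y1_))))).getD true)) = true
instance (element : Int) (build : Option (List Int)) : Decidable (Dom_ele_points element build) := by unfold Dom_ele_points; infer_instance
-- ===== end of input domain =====

-- B replaces the per-level recursion with a closed-form band sum (O(1)); equivalence of return values on 0 ≤ effective element ≤ 100.

-- ===== PORT A =====
-- Literal transliteration of A's recursion; the final `else 0` stands for the
-- ValueError branch, which Pre_ele_points excludes.
def pvRecA (e : Int) : Int :=
  if e = 0 then 0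
  else if 1 ≤ e ∧ e ≤ 20 then 1 + pvRecA (e - 1)
  else if 21 ≤ e ∧ e ≤ 30 then 2 + pvRecA (e - 1)
  else if 31 ≤ e ∧ e ≤ 40 then 3 + pvRecA (e - 1)
  else if 41 ≤ e ∧ e ≤ 50 then 4 + pvRecA (e - 1)
  else if 51 ≤ e ∧ e ≤ 70 then 5 + pvRecA (e - 1)
  else if 71 ≤ e ∧ e ≤ 80 then 6 + pvRecA (e - 1)
  else if 81 ≤ e ∧ e ≤ 100 then 7 + pvRecA (e - 1)
  else 0
termination_by e.toNat
decreasing_by all_goals omega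

def ele_points (element : Int) (build : Option (List Int)) : Int :=
  match build with
  | some (b :: _) => pvRecA b      -- `if build: element = build[0]`
  | _ => pvRecA element

-- ===== PORT B =====
def ele_points_alt (element : Int) (build : Option (List Int)) : Int :=
  let e : Int := (build.getD []).headD element   -- `if build: element = build[0]`
  if 0 ≤ e ∧ e ≤ 100 then
    [((1:Int), (20:Int), (1:Int)), (21, 30, 2), (31, 40, 3), (41, 50, 4),
     (51, 70, 5), (71, 80, 6), (81, 100, 7)].foldl
      (fun t bw => if bw.1 ≤ e then t + (min e bw.2.1 - bw.1 + 1) * bw.2.2 else t) 0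
  else 0  -- ValueError branch of Source B; excluded by Pre_ele_points

-- ===== PRECONDITION & SPEC =====
-- Pre_ excludes exactly the inputs on which Python A raises ValueError
-- (effective element outside 0..100).
def Pre_ele_points (element : Int) (build : Option (List Int)) : Prop :=
  0 ≤ (build.getD []).headD element ∧ (build.getD []).headD element ≤ 100

instance (element : Int) (build : Option (List Int)) : Decidable (Pre_ele_points element build) := by
  unfold Pre_ele_points; infer_instance

def pvWitness_ele_points : Int × Option (List Int) := (37, some [85, 2])

def Spec_ele_points (element : Int) (build : Option (List Int)) (out : Int) : Prop := out = ele_points_alt element build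
instance (element : Int) (build : Option (List Int)) (out : Int) : Decidable (Spec_ele_points element build out) := by unfold Spec_ele_points; infer_instance

-- ===== CLAIM (what is proved, stated in full; the proofs are below) =====
def Claim_equal_ele_points : Prop := ∀ (element : Int) (build : Option (List Int)), Dom_ele_points element build → Pre_ele_points element build → Spec_ele_points element build (ele_points element build)

-- ===== LEMMAS AND PROOFS =====

def pvBandW (e : Int) : Int :=
  if 1 ≤ e ∧ e ≤ 20 then 1
  else if 21 ≤ e ∧ e ≤ 30 then 2
  else if 31 ≤ e ∧ e ≤ 40 then 3
  else if 41 ≤ e ∧ e ≤ 50 then 4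
  else if 51 ≤ e ∧ e ≤ 70 then 5
  else if 71 ≤ e ∧ e ≤ 80 then 6
  else if 81 ≤ e ∧ e ≤ 100 then 7
  else 0

def pvClosedExpr (e : Int) : Int :=
  1 * max 0 (min e 20 - 1 + 1) + 2 * max 0 (min e 30 - 21 + 1) +
  3 * max 0 (min e 40 - 31 + 1) + 4 * max 0 (min e 50 - 41 + 1) +
  5 * max 0 (min e 70 - 51 + 1) + 6 * max 0 (min e 80 - 71 + 1) +
  7 * max 0 (min e 100 - 81 + 1)

theorem band_if (e lo hi w : Int) (hlohi : lo ≤ hi) :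
    (if lo ≤ e then (min e hi - lo + 1) * w else 0) = w * max 0 (min e hi - lo + 1) := by
  split_ifs with h
  · have hmx : max 0 (min e hi - lo + 1) = min e hi - lo + 1 := by omega
    rw [hmx]; ring
  · have hmx : max 0 (min e hi - lo + 1) = 0 := by omega
    rw [hmx]; ring

theorem alt_closed (e : Int) (h0 : 0 ≤ e) (h1 : e ≤ 100) :
    ele_points_alt e none = pvClosedExpr e := by
  simp only [ele_points_alt, Option.getD, List.headD]
  rw [if_pos (⟨h0, h1⟩ : 0 ≤ e ∧ e ≤ 100)]
  have hb : (fun (t : Int) (bw : Int × Int × Int) =>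
      if bw.1 ≤ e then t + (min e bw.2.1 - bw.1 + 1) * bw.2.2 else t) =
      fun t bw => t + (if bw.1 ≤ e then (min e bw.2.1 - bw.1 + 1) * bw.2.2 else 0) := by
    funext t bw; split_ifs <;> ring
  rw [hb, PySem.List.foldl_add]
  simp only [List.map, List.sum_cons, List.sum_nil]
  rw [band_if e 1 20 1 (by norm_num), band_if e 21 30 2 (by norm_num),
      band_if e 31 40 3 (by norm_num), band_if e 41 50 4 (by norm_num),
      band_if e 51 70 5 (by norm_num), band_if e 71 80 6 (by norm_num),
      band_if e 81 100 7 (by norm_num)]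
  simp only [pvClosedExpr]
  ring

theorem band_step (e lo hi : Int) :
    max 0 (min e hi - lo + 1) =
      (if lo ≤ e ∧ e ≤ hi then 1 else 0) + max 0 (min (e - 1) hi - lo + 1) := by
  split_ifs <;> omega

theorem rec_step (e : Int) (h1 : 1 ≤ e) (h2 : e ≤ 100) :
    pvRecA e = pvBandW e + pvRecA (e - 1) := by
  unfold pvBandW
  conv_lhs => rw [pvRecA]
  rw [if_neg (show ¬ e = 0 by omega)]
  split_ifs <;> first | rfl | (exfalso; omega)

theorem closed_step (e : Int) (h1 : 1 ≤ e) (h2 : e ≤ 100) :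
    pvClosedExpr e = pvBandW e + pvClosedExpr (e - 1) := by
  unfold pvClosedExpr pvBandW
  rw [band_step e 1 20, band_step e 21 30, band_step e 31 40, band_step e 41 50,
      band_step e 51 70, band_step e 71 80, band_step e 81 100]
  split_ifs <;> omega

theorem ele_points_key (n : Nat) (h : n ≤ 100) :
    pvRecA (n : Int) = ele_points_alt (n : Int) none := by
  induction n with
  | zero =>
    rw [pvRecA, alt_closed _ (by norm_num) (by norm_num)]
    unfold pvClosedExpr
    norm_num
  | succ m ih =>
    have ih' := ih (by omega)
    have h1 : (1 : Int) ≤ ((m + 1 : Nat) : Int) := by push_cast; omega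
    have h2 : ((m + 1 : Nat) : Int) ≤ 100 := by push_cast; omega
    have hm1 : ((m + 1 : Nat) : Int) - 1 = (m : Int) := by push_cast; ring
    calc pvRecA ((m + 1 : Nat) : Int)
        = pvBandW ((m + 1 : Nat) : Int) + pvRecA (((m + 1 : Nat) : Int) - 1) :=
          rec_step _ h1 h2
      _ = pvBandW ((m + 1 : Nat) : Int) + pvClosedExpr ((m : Nat) : Int) := by
          rw [hm1, ih', alt_closed _ (by positivity) (by omega)]
      _ = pvClosedExpr ((m + 1 : Nat) : Int) := by rw [closed_step _ h1 h2, hm1]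
      _ = ele_points_alt ((m + 1 : Nat) : Int) none := (alt_closed _ (by positivity) h2).symm

-- ===== VERDICT (by name: the statement is the Claim_ definition above) =====
theorem ele_points_spec : Claim_equal_ele_points := by
  intro element build _ hpre
  unfold Spec_ele_points ele_points Pre_ele_points at *
  cases build with
  | none =>
    obtain ⟨h0, h1⟩ := hpre
    have h0' : 0 ≤ element := h0
    have h1' : element ≤ 100 := h1
    have := ele_points_key element.toNat (by omega)
    rw [Int.toNat_of_nonneg h0'] at this
    simpa [ele_points_alt] using this
  | some l =>
    cases l with
    | nil =>
      obtain ⟨h0, h1⟩ := hpre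
      have h0' : 0 ≤ element := h0
      have h1' : element ≤ 100 := h1
      have := ele_points_key element.toNat (by omega)
      rw [Int.toNat_of_nonneg h0'] at this
      simpa [ele_points_alt] using this
    | cons b rest =>
      obtain ⟨h0, h1⟩ := hpre
      have h0' : 0 ≤ b := h0
      have h1' : b ≤ 100 := h1
      have := ele_points_key b.toNat (by omega)
      rw [Int.toNat_of_nonneg h0'] at this
      simpa [ele_points_alt] using this
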